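-- pv_equiv track=rewrite | github.com/bennati/EnergyVCG | datasets/analysis.py | group_list
-- ===== SOURCE A (Python) =====
-- import itertools
--
-- def group_list(l,n):
--     """
--     l -> [[X0],[X0,X1],...[X0,X1,...Xn],[X1,X2,...Xn+1]...[Xlast-n,Xlast-n+1,...Xlast]]
--     """
--     ret=[]
--     iters=itertools.tee(l,n)
--     for i in range(1,n):
--         ret.append(l[:i])
--         for j in range(i):
--             next(iters[i],None) # progress iterators
--     ret=ret+list(zip(*iters))
--     return list(map(list,ret))
-- ===== SOURCE B (Python) =====
-- def group_list(l, n):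
--     if n <= 0:
--         return []
--     prefixes = [l[:i] for i in range(1, n)]
--     windows = [l[i:i + n] for i in range(len(l) - n + 1)]
--     return prefixes + windows
-- ===== Notes on version B (the rewrite author's own statement) =====
-- stated objective: simpler
-- what changed: Replaced A's itertools.tee of n staggered iterators consumed by zip (building windows element-by-element from n parallel iterators) with direct random-access index slicing: prefixes l[:i] for i in 1..n-1 followed by windows l[i:i+n] over the valid start indices.
import Mathlib
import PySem

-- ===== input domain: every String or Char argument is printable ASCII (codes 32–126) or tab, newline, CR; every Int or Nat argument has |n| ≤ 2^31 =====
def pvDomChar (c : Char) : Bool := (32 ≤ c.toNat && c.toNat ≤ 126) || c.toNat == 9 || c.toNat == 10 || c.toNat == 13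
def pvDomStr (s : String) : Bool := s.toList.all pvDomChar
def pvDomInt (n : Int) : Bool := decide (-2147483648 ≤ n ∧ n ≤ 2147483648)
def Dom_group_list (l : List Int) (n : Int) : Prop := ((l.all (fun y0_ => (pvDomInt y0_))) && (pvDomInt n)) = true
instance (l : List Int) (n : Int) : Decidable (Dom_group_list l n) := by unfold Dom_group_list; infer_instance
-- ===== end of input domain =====

-- B replaces A's tee/zip staggered-iterator construction by direct index slicing (prefixes l[:i], windows l[i:i+n]); objective: simpler.
-- On n < 0 Python A raises ValueError (itertools.tee); those inputs are outside Pre_.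

-- ===== PORT A =====
-- zip(*iters): repeatedly take one head from every iterator until some iterator is exhausted
def zipN (its : List (List Int)) : List (List Int) :=
  match its with
  | [] => []
  | a :: rest =>
    if h : (a :: rest).all (fun x => !x.isEmpty) then
      ((a :: rest).map (fun x => x.headD 0)) :: zipN ((a :: rest).map (fun x => x.drop 1))
    else []
termination_by (its.headD []).length
decreasing_by
  simp_all
  cases a with
  | nil => simp at h
  | cons y ys => simp

def group_list (l : List Int) (n : Int) : List (List Int) :=
  -- iters = itertools.tee(l, n): n independent iterator states, each the remaining suffix of l
  let iters : List (List Int) := List.replicate n.toNat l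
  -- for i in range(1, n): ret.append(l[:i]); for j in range(i): next(iters[i], None)
  let st := (PySem.List.pyRange 1 n 1).foldl
    (fun (st : List (List Int) × List (List Int)) i =>
      (st.1 ++ [PySem.List.slice l none (some i)],
       (PySem.List.pyRange 0 i 1).foldl
         (fun its _ => its.set i.toNat ((its.getD i.toNat []).drop 1)) st.2))
    ([], iters)
  -- ret = ret + list(zip(*iters)); list(map(list, ret)) is the identity here
  st.1 ++ zipN st.2

-- ===== PORT B =====
def group_list_alt (l : List Int) (n : Int) : List (List Int) :=
  if n ≤ 0 then []
  else
    ((PySem.List.pyRange 1 n 1).map (fun i => PySem.List.slice l none (some i)))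
      ++ ((PySem.List.pyRange 0 ((l.length : Int) - n + 1) 1).map
            (fun i => PySem.List.slice l (some i) (some (i + n))))

-- ===== PRECONDITION & SPEC =====
-- Pre_ excludes only n < 0, where Python A raises ValueError (itertools.tee refuses a negative count).
def Pre_group_list (l : List Int) (n : Int) : Prop := 0 ≤ n
instance (l : List Int) (n : Int) : Decidable (Pre_group_list l n) := by unfold Pre_group_list; infer_instance
def pvWitness_group_list : List Int × Int := ([1, 2, 3], 2)

def Spec_group_list (l : List Int) (n : Int) (out : List (List Int)) : Prop := out = group_list_alt l n
instance (l : List Int) (n : Int) (out : List (List Int)) : Decidable (Spec_group_list l n out) := by unfold Spec_group_list; infer_instance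

-- ===== CLAIM (what is proved, stated in full; the proofs are below) =====
def Claim_equal_group_list : Prop := ∀ (l : List Int) (n : Int), Dom_group_list l n → Pre_group_list l n → Spec_group_list l n (group_list l n)

-- ===== LEMMAS AND PROOFS =====
def itersSt (l : List Int) (m k : Nat) : List (List Int) :=
  (List.range m).map (fun j => if j ≤ k then l.drop j else l)

lemma itersSt_zero (l : List Int) (m : Nat) : itersSt l m 0 = List.replicate m l := by
  apply List.ext_getElem
  · simp [itersSt]
  · intro i h1 h2
    simp only [itersSt, List.getElem_map, List.getElem_range, List.getElem_replicate]
    split_ifs with h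
    · have : i = 0 := by omega
      simp [this]
    · rfl

lemma iterate_set_drop (its : List (List Int)) (p : Nat) (hp : p < its.length) (k : Nat) :
    (fun its' : List (List Int) => its'.set p ((its'.getD p []).drop 1))^[k] its
      = its.set p ((its.getD p []).drop k) := by
  induction k with
  | zero => simp [List.getD_eq_getElem?_getD, List.getElem?_eq_getElem hp, List.set_getElem_self]
  | succ k ih =>
    rw [Function.iterate_succ_apply', ih]
    simp [List.getD_eq_getElem?_getD, hp, List.set_set, List.drop_drop]

lemma itersSt_set (l : List Int) (m k : Nat) (h : k + 1 < m) :
    (itersSt l m k).set (k + 1) (l.drop (k + 1)) = itersSt l m (k + 1) := by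
  apply List.ext_getElem
  · simp [itersSt]
  · intro i h1 h2
    simp only [itersSt, List.length_map, List.length_range] at h1 h2 ⊢
    rw [List.getElem_set]
    by_cases hik : k + 1 = i
    · simp only [hik]
      have h2' : i < m := by simpa using h2
      simp
    · simp only [if_neg hik]
      have h2' : i < m := by simpa using h2
      simp only [List.getElem_map, List.getElem_range]
      split_ifs with ha hb hb
      · rfl
      · omega
      · omega
      · rfl

lemma zipN_drops (m : Nat) (hm : 1 ≤ m) (l : List Int) :
    zipN ((List.range m).map (fun j => l.drop j))
      = (List.range (l.length + 1 - m)).map (fun i => (l.drop i).take m) := by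
  obtain ⟨mm, rfl⟩ : ∃ mm, m = mm + 1 := ⟨m - 1, by omega⟩
  induction l with
  | nil =>
    have hE : (List.range (mm+1)).map (fun j => List.drop j ([] : List Int)) = [] :: (List.range mm).map (fun j => List.drop (j+1) ([] : List Int)) := by
      rw [List.range_succ_eq_map]
      simp [List.map_map, Function.comp_def]
    rw [hE, zipN]
    simp
  | cons x l ih =>
    have hE : (List.range (mm+1)).map (fun j => List.drop j (x :: l)) = (x :: l) :: (List.range mm).map (fun j => List.drop (j+1) (x :: l)) := by
      rw [List.range_succ_eq_map]
      simp [List.map_map, Function.comp_def]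
    rw [hE, zipN, ← hE]
    by_cases hlen : mm ≤ l.length
    · have hcond : ∀ t ∈ (List.range (mm+1)).map (fun j => List.drop j (x :: l)), (!t.isEmpty) = true := by
        intro t ht
        simp only [List.mem_map, List.mem_range] at ht
        obtain ⟨j, hj, rfl⟩ := ht
        simp [List.drop_eq_nil_iff]
        omega
      rw [dif_pos (List.all_eq_true.2 hcond)]
      have hheads : ((List.range (mm+1)).map (fun j => (x :: l).drop j)).map (fun t => t.headD 0)
          = (x :: l).take (mm+1) := by
        apply List.ext_getElem
        · simp; omega
        · intro i h1 h2
          simp only [List.getElem_take, List.map_map, List.getElem_map, List.getElem_range,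
            Function.comp]
          rw [List.headD_eq_head?_getD, List.head?_drop]
          simp only [List.length_map, List.length_range] at h1
          rw [List.getElem?_eq_getElem (by simp; omega)]
          rfl
      have htails : ((List.range (mm+1)).map (fun j => (x :: l).drop j)).map (fun t => t.drop 1)
          = (List.range (mm+1)).map (fun j => l.drop j) := by
        simp only [List.map_map]
        apply List.map_congr_left
        intro j hj
        show List.drop 1 (List.drop j (x :: l)) = List.drop j l
        rw [List.drop_drop, List.drop_succ_cons]
      rw [hheads, htails, ih]
      have hrange : (x :: l).length + 1 - (mm + 1) = (l.length + 1 - (mm + 1)) + 1 := by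
        simp; omega
      rw [hrange, List.range_succ_eq_map, List.map_cons, List.map_map]
      congr 1
    · have hcond : ¬ (((List.range (mm+1)).map (fun j => List.drop j (x :: l))).all (fun t => !t.isEmpty) = true) := by
        simp only [List.all_eq_true, not_forall]
        refine ⟨(x :: l).drop mm, List.mem_map.2 ⟨mm, List.mem_range.2 (by omega), rfl⟩, ?_⟩
        simp [List.drop_eq_nil_iff]
        omega
      rw [dif_neg hcond]
      have h0 : (x :: l).length + 1 - (mm + 1) = 0 := by simp only [List.length_cons]; omega
      rw [h0]
      simp

lemma foldl_const_iterate {α β : Type} (f : α → α) (xs : List β) (a : α) :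
    xs.foldl (fun s _ => f s) a = f^[xs.length] a := by
  induction xs generalizing a with
  | nil => simp
  | cons x xs ih => simp [ih, Function.iterate_succ_apply]

lemma itersSt_getD (l : List Int) (m k : Nat) (h : k + 1 < m) :
    (itersSt l m k).getD (k + 1) [] = l := by
  rw [List.getD_eq_getElem _ _ (by simp [itersSt]; omega)]
  simp [itersSt]

lemma outer_loop (l : List Int) (m : Nat) (hm : 1 ≤ m) (k : Nat) (hk : k ≤ m - 1) :
    (List.range k).foldl
      (fun (st : List (List Int) × List (List Int)) (j : Nat) =>
        (st.1 ++ [PySem.List.slice l none (some (1 + (j : Int)))],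
         (PySem.List.pyRange 0 (1 + (j : Int)) 1).foldl
           (fun its _ => its.set (1 + (j : Int)).toNat ((its.getD (1 + (j : Int)).toNat []).drop 1)) st.2))
      ([], List.replicate m l)
      = ((List.range k).map (fun j => l.take (j + 1)), itersSt l m k) := by
  induction k with
  | zero => simp [itersSt_zero]
  | succ k ih =>
    have hk' : k ≤ m - 1 := by omega
    rw [List.range_succ, List.foldl_append, ih hk']
    simp only [List.foldl_cons, List.foldl_nil]
    have hlen : (PySem.List.pyRange 0 (1 + (k : Int)) 1).length = k + 1 := by
      rw [PySem.List.length_pyRange_one]; omega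
    have htn : (1 + (k : Int)).toNat = k + 1 := by omega
    rw [foldl_const_iterate, hlen, htn]
    have hp : k + 1 < (itersSt l m k).length := by
      simp [itersSt]; omega
    rw [iterate_set_drop _ _ hp, itersSt_getD l m k (by omega), itersSt_set l m k (by omega)]
    congr 1
    rw [List.map_append]
    simp only [List.map_cons, List.map_nil]
    have hc : (1 + (k : Int)) = ((k + 1 : Nat) : Int) := by push_cast; ring
    rw [hc, PySem.List.slice_to_natCast]

lemma itersSt_last (l : List Int) (m : Nat) (hm : 1 ≤ m) :
    itersSt l m (m - 1) = (List.range m).map (fun j => l.drop j) := by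
  unfold itersSt
  apply List.map_congr_left
  intro j hj
  simp only [List.mem_range] at hj
  rw [if_pos (by omega)]

lemma group_list_eq_alt (l : List Int) (n : Int) (hn : 0 ≤ n) : group_list l n = group_list_alt l n := by
  lift n to ℕ using hn with m
  by_cases hm : m = 0
  · subst hm
    simp [group_list, group_list_alt, zipN, PySem.List.pyRange_one]
  · have hm1 : 1 ≤ m := by omega
    unfold group_list group_list_alt
    rw [if_neg (by omega)]
    simp only [Int.toNat_natCast]
    rw [PySem.List.pyRange_one 1 (m : Int), List.foldl_map]
    have htn1 : ((m : Int) - 1).toNat = m - 1 := by omega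
    rw [htn1]
    rw [outer_loop l m hm1 (m - 1) (le_refl _)]
    rw [itersSt_last l m hm1, zipN_drops m hm1 l]
    congr 1
    · -- prefixes
      show List.map (fun j => l.take (j + 1)) (List.range (m - 1)) = _
      rw [List.map_map]
      apply List.map_congr_left
      intro j hj
      simp only [Function.comp]
      have hc : (1 + (j : Int)) = ((j + 1 : Nat) : Int) := by push_cast; ring
      rw [hc, PySem.List.slice_to_natCast]
    · -- windows
      show List.map (fun i => (l.drop i).take m) (List.range (l.length + 1 - m)) = _
      rw [PySem.List.pyRange_one 0 ((l.length : Int) - m + 1), List.map_map]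
      have htn2 : ((l.length : Int) - m + 1 - 0).toNat = l.length + 1 - m := by omega
      rw [htn2]
      apply List.map_congr_left
      intro i hi
      simp only [Function.comp, zero_add]
      rw [PySem.List.slice_natCast_add]

-- ===== VERDICT (by name: the statement is the Claim_ definition above) =====
theorem group_list_spec : Claim_equal_group_list := by
  intro l n _ hn
  unfold Spec_group_list
  exact group_list_eq_alt l n hn
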